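-- pv_equiv track=rewrite | github.com/kardinal95/RegEx | py/fsm.py | cut_brackets
-- ===== SOURCE A (Python) =====
-- def cut_brackets(compound: set) -> set:
--     result = set()
--     for item in compound:
--         left = item.find('(')
--         while left != -1:
--             level = 0
--             for index, sym in enumerate(item):
--                 if sym == '(':
--                     level += 1
--                 elif sym == ')':
--                     level -= 1
--                     if level == 0:
--                         item = item[:left] + item[index + 1:]
--                         break
--             left = item.find('(')
--         result.add(item)
--     return result
-- ===== SOURCE B (Python) =====
-- def cut_brackets(compound: set) -> set:
--     # One pass per string: track nesting depth; a ')' only closes when depth > 0,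
--     # keep the characters that are outside every bracket group.
--     result = set()
--     for item in compound:
--         depth = 0
--         out = []
--         for ch in item:
--             if ch == '(':
--                 depth += 1
--             elif ch == ')' and depth > 0:
--                 depth -= 1
--             elif depth == 0:
--                 out.append(ch)
--         result.add(''.join(out))
--     return result
-- ===== Notes on version B (the rewrite author's own statement) =====
-- stated objective: simpler
-- what changed: A repeatedly rescans the string from the start (find '(' then re-count levels) and rebuilds it after each removal; B makes a single left-to-right pass per string keeping only the characters outside every bracket group.
-- outside the precondition, e.g. on cut_brackets({')(())'}): A returns {'))'}, B returns {')'}; on cut_brackets({'('}): A does not finish within the time limit, B returns {''}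
import Mathlib
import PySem

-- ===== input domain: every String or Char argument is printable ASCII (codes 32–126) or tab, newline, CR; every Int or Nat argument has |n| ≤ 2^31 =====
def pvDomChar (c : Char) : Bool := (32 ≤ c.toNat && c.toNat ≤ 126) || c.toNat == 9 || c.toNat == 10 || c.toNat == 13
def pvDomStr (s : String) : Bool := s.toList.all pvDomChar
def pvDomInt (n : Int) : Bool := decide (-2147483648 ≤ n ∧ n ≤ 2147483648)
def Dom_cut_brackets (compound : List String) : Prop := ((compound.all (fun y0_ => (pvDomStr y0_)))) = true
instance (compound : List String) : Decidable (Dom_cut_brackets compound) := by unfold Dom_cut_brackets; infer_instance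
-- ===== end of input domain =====

-- B replaces A's repeated rescan-and-rebuild of each string by a single depth-tracking pass
-- (objective: simpler). Return-value equivalence is proved on Pre_ (see its comment).

-- ===== PORT A =====
-- item.find('(') : index of first '(' (none = Python's -1); hand-rolled single-char find, exact
def pvFindLParen (cs : List Char) (i : Nat) : Option Nat :=
  match cs with
  | [] => none
  | c :: rest => if c = '(' then some i else pvFindLParen rest (i + 1)

-- the inner 'for index, sym in enumerate(item)' with the break: returns the break index
def pvScanBreak (cs : List Char) (level : Int) (i : Nat) : Option Nat :=
  match cs with
  | [] => none
  | c :: rest =>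
    if c = '(' then pvScanBreak rest (level + 1) (i + 1)
    else if c = ')' then
      (if level - 1 = 0 then some i else pvScanBreak rest (level - 1) (i + 1))
    else pvScanBreak rest level (i + 1)

-- the 'while left != -1' loop; fuel bounds the iteration count (each removal shortens the
-- string by at least 2, so fuel = length suffices); on inputs where Python would loop
-- forever (excluded by Pre_) the fuel runs out / the scan finds no break and we stop.
def pvCutLoop (fuel : Nat) (cs : List Char) : List Char :=
  match fuel with
  | 0 => cs
  | fuel + 1 =>
    match pvFindLParen cs 0 with
    | none => cs
    | some left =>
      match pvScanBreak cs 0 0 with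
      | some index => pvCutLoop fuel (cs.take left ++ cs.drop (index + 1))
      | none => cs

def cut_brackets (compound : List String) : List String :=
  compound.foldl
    (fun result item =>
      PySem.Set.add result (String.mk (pvCutLoop item.toList.length item.toList)))
    (PySem.Set.empty)

-- ===== PORT B =====
def pvFilterDepth (cs : List Char) (depth : Int) : List Char :=
  match cs with
  | [] => []
  | c :: rest =>
    if c = '(' then pvFilterDepth rest (depth + 1)
    else if c = ')' ∧ 0 < depth then pvFilterDepth rest (depth - 1)
    else if depth = 0 then c :: pvFilterDepth rest depth
    else pvFilterDepth rest depth

def cut_brackets_alt (compound : List String) : List String :=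
  compound.foldl
    (fun result item =>
      PySem.Set.add result (String.mk (pvFilterDepth item.toList 0)))
    (PySem.Set.empty)

-- ===== PRECONDITION & SPEC =====
-- pvOk cs d seen: every '(' of cs (scanned from open depth d) is matched, and no '('
-- occurs once an unmatched ')' has been seen (seen = true)
def pvOk (cs : List Char) (d : Nat) (seen : Bool) : Bool :=
  match cs with
  | [] => d = 0
  | c :: rest =>
    if c = '(' then !seen && pvOk rest (d + 1) seen
    else if c = ')' then (match d with | 0 => pvOk rest 0 true | d + 1 => pvOk rest d seen)
    else pvOk rest d seen

-- Pre_ excludes strings with an unmatched '(' — on those A loops forever — and strings in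
-- which a '(' follows an unmatched ')': there A's level counter starts below zero, so A
-- either loops forever too or returns after cutting a chunk that is not a balanced bracket
-- group (e.g. A turns ')(())'  into '))'): a corner no specification of bracket removal
-- fixes, excluded here and cited in the claim.
def Pre_cut_brackets (compound : List String) : Prop :=
  ∀ s ∈ compound, pvOk s.toList 0 false = true

instance (compound : List String) : Decidable (Pre_cut_brackets compound) := by
  unfold Pre_cut_brackets; infer_instance

def pvWitness_cut_brackets : List String := ["a(b(c))d", "", "(x)(y) z)"]

def Spec_cut_brackets (compound : List String) (out : List String) : Prop := out = cut_brackets_alt compound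
instance (compound : List String) (out : List String) : Decidable (Spec_cut_brackets compound out) := by unfold Spec_cut_brackets; infer_instance

-- ===== CLAIM (what is proved, stated in full; the proofs are below) =====
def Claim_equal_cut_brackets : Prop := ∀ (compound : List String), Dom_cut_brackets compound → Pre_cut_brackets compound → Spec_cut_brackets compound (cut_brackets compound)

-- ===== LEMMAS AND PROOFS =====

-- balanced-prefix scanner (proof-side): none = an unmatched ')' was hit; some d = final open depth
def pvRun (cs : List Char) (d : Nat) : Option Nat :=
  match cs with
  | [] => some d
  | c :: rest =>
    if c = '(' then pvRun rest (d + 1)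
    else if c = ')' then (match d with | 0 => none | d + 1 => pvRun rest d)
    else pvRun rest d

theorem pvRun_shift (a : List Char) : ∀ (d e k : Nat),
    pvRun a d = some e → pvRun a (d + k) = some (e + k) := by
  induction a with
  | nil => intro d e k h; simp [pvRun] at h ⊢; omega
  | cons c rest ih =>
    intro d e k h
    simp only [pvRun] at h ⊢
    split_ifs at h ⊢ with h1 h2
    · rw [show d + k + 1 = (d + 1) + k from by omega]
      exact ih (d+1) e k h
    · cases d with
      | zero => simp at h
      | succ d' =>
        rw [show d' + 1 + k = (d' + k) + 1 from by omega]
        exact ih d' e k h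
    · exact ih d e k h

theorem pvRun_append (a : List Char) : ∀ (b : List Char) (d : Nat),
    pvRun (a ++ b) d = (pvRun a d).bind (pvRun b) := by
  induction a with
  | nil => intro b d; simp [pvRun]
  | cons c rest ih =>
    intro b d
    simp only [List.cons_append, pvRun]
    split_ifs with h1 h2
    · exact ih b (d+1)
    · match d with
      | 0 => simp
      | d+1 => exact ih b d
    · exact ih b d

theorem pvRun_parenFree (p : List Char) (hl : '(' ∉ p) (hr : ')' ∉ p) (d : Nat) :
    pvRun p d = some d := by
  induction p with
  | nil => simp [pvRun]
  | cons c rest ih =>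
    simp only [List.mem_cons, not_or] at hl hr
    simp only [pvRun, if_neg (Ne.symm hl.1), if_neg (Ne.symm hr.1)]
    exact ih hl.2 hr.2

theorem pvRun_no_lparen_no_rparen (cs : List Char) : '(' ∉ cs →
    pvRun cs 0 = some 0 → ')' ∉ cs := by
  induction cs with
  | nil => simp
  | cons c rest ih =>
    intro hl h
    simp only [List.mem_cons, not_or] at hl
    simp only [pvRun, if_neg (Ne.symm hl.1)] at h
    by_cases hc : c = ')'
    · subst hc; simp at h
    · simp only [if_neg hc] at h
      simp only [List.mem_cons, not_or]
      exact ⟨Ne.symm hc, ih hl.2 h⟩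

theorem pvFilterDepth_parenFree (p : List Char) (hl : '(' ∉ p) (hr : ')' ∉ p)
    (b : List Char) : pvFilterDepth (p ++ b) 0 = p ++ pvFilterDepth b 0 := by
  induction p with
  | nil => simp
  | cons c rest ih =>
    simp only [List.mem_cons, not_or] at hl hr
    simp only [List.cons_append, pvFilterDepth, if_neg (Ne.symm hl.1),
      if_neg (show ¬ (c = ')' ∧ (0:Int) < 0) from fun h => (Ne.symm hr.1) h.1),
      if_pos rfl]
    simpa using ih hl.2 hr.2

-- a '('-free string at depth 0 is kept verbatim (unmatched ')' are literal characters)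
theorem pvFilterDepth_noLParen (z : List Char) (hl : '(' ∉ z) :
    pvFilterDepth z 0 = z := by
  induction z with
  | nil => rfl
  | cons c rest ih =>
    simp only [List.mem_cons, not_or] at hl
    simp only [pvFilterDepth, if_neg (Ne.symm hl.1),
      if_neg (show ¬ (c = ')' ∧ (0:Int) < 0) from fun h => by exact absurd h.2 (by norm_num))]
    simp [ih hl.2]

theorem pvFindLParen_parenFree (p : List Char) (hl : '(' ∉ p) (rest : List Char) :
    ∀ i : Nat, pvFindLParen (p ++ '(' :: rest) i = some (i + p.length) := by
  induction p with
  | nil => intro i; simp [pvFindLParen]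
  | cons c q ih =>
    intro i
    simp only [List.mem_cons, not_or] at hl
    simp only [List.cons_append, pvFindLParen, if_neg (Ne.symm hl.1)]
    rw [ih hl.2 (i+1)]
    congr 1
    simp; omega

theorem pvScanBreak_parenFree (p : List Char) (hl : '(' ∉ p) (hr : ')' ∉ p)
    (rest : List Char) : ∀ i : Nat,
    pvScanBreak (p ++ rest) 0 i = pvScanBreak rest 0 (i + p.length) := by
  induction p with
  | nil => intro i; simp
  | cons c q ih =>
    intro i
    simp only [List.mem_cons, not_or] at hl hr
    simp only [List.cons_append, pvScanBreak, if_neg (Ne.symm hl.1), if_neg (Ne.symm hr.1)]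
    rw [ih hl.2 hr.2 (i+1)]
    congr 1
    simp; omega

-- scanning a balanced-at-depth segment never breaks inside it
theorem pvScanBreak_run (m : List Char) : ∀ (rest : List Char) (d e : Nat) (i : Nat),
    pvRun m d = some e →
    pvScanBreak (m ++ rest) ((d : Int) + 1) i = pvScanBreak rest ((e : Int) + 1) (i + m.length) := by
  induction m with
  | nil => intro rest d e i h; simp [pvRun] at h; subst h; simp
  | cons c q ih =>
    intro rest d e i h
    simp only [pvRun] at h
    simp only [List.cons_append, pvScanBreak]
    by_cases h1 : c = '('
    · rw [if_pos h1] at h ⊢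
      rw [show ((d:Int)+1+1) = (((d+1 : Nat)):Int) + 1 by push_cast; ring]
      rw [ih rest (d+1) e (i+1) h]
      congr 1; simp; omega
    · rw [if_neg h1] at h ⊢
      by_cases h2 : c = ')'
      · rw [if_pos h2] at h ⊢
        cases d with
        | zero => simp at h
        | succ d' =>
          have h' : pvRun q d' = some e := h
          rw [if_neg (by push_cast; omega : ¬ ((((d'+1 : Nat)):Int) + 1 - 1 = 0))]
          rw [show (((d'+1 : Nat)):Int) + 1 - 1 = ((d' : Nat):Int) + 1 by push_cast; ring]
          rw [ih rest d' e (i+1) h']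
          congr 1; simp; omega
      · rw [if_neg h2] at h ⊢
        rw [ih rest d e (i+1) h]
        congr 1; simp; omega

-- filtering drops every character of a segment scanned at depth ≥ 1
theorem pvFilterDepth_run (m : List Char) : ∀ (b : List Char) (d e : Nat),
    pvRun m d = some e →
    pvFilterDepth (m ++ b) ((d : Int) + 1) = pvFilterDepth b ((e : Int) + 1) := by
  induction m with
  | nil => intro b d e h; simp [pvRun] at h; subst h; simp
  | cons c q ih =>
    intro b d e h
    simp only [pvRun] at h
    simp only [List.cons_append, pvFilterDepth]
    by_cases h1 : c = '('
    · rw [if_pos h1] at h ⊢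
      rw [show ((d:Int)+1+1) = (((d+1 : Nat)):Int) + 1 by push_cast; ring]
      exact ih b (d+1) e h
    · rw [if_neg h1] at h ⊢
      by_cases h2 : c = ')'
      · rw [if_pos h2] at h
        rw [if_pos (show c = ')' ∧ (0:Int) < (d:Int) + 1 from ⟨h2, by positivity⟩)]
        cases d with
        | zero => simp at h
        | succ d' =>
          have h' : pvRun q d' = some e := h
          rw [show (((d'+1 : Nat)):Int) + 1 - 1 = ((d' : Nat):Int) + 1 by push_cast; ring]
          exact ih b d' e h'
      · rw [if_neg h2] at h
        rw [if_neg (show ¬ (c = ')' ∧ (0:Int) < (d:Int) + 1) from fun hh => h2 hh.1)]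
        rw [if_neg (by push_cast; omega : ¬ ((d:Int) + 1 = 0))]
        exact ih b d e h

-- a string balanced from depth d+1 splits at the ')' matching the pending '('
theorem pvRun_split : ∀ (n : Nat) (m : List Char) (d : Nat), m.length ≤ n →
    pvRun m (d + 1) = some 0 →
    ∃ a b, m = a ++ ')' :: b ∧ pvRun a 0 = some 0 ∧ pvRun b d = some 0 := by
  intro n
  induction n with
  | zero =>
    intro m d hlen h
    match m with
    | [] => simp [pvRun] at h
    | _ :: _ => simp at hlen
  | succ n ih =>
    intro m d hlen h
    match m with
    | [] => simp [pvRun] at h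
    | c :: rest =>
      by_cases h1 : c = '('
      · subst h1
        simp only [pvRun, if_pos rfl] at h
        obtain ⟨a, b, rfl, ha, hb⟩ := ih rest (d+1) (by simpa using hlen) h
        obtain ⟨a2, b2, rfl, ha2, hb2⟩ := ih b d
          (by simp at hlen ⊢; omega) hb
        refine ⟨'(' :: a ++ ')' :: a2, b2, by simp, ?_, hb2⟩
        show pvRun ('(' :: (a ++ ')' :: a2)) 0 = some 0
        simp only [pvRun, if_pos rfl]
        rw [pvRun_append]
        rw [pvRun_shift a 0 0 1 ha]
        simp only [Option.bind_some]
        simpa [pvRun] using ha2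
      · by_cases h2 : c = ')'
        · subst h2
          simp only [pvRun, if_neg (show ¬ ((')':Char) = '(') by decide)] at h
          exact ⟨[], rest, rfl, by simp [pvRun], h⟩
        · simp only [pvRun, if_neg h1, if_neg h2] at h
          obtain ⟨a, b, rfl, ha, hb⟩ := ih rest d (by simpa using hlen) h
          refine ⟨c :: a, b, by simp, ?_, hb⟩
          simpa [pvRun, h1, h2] using ha

-- decomposition of a balanced string containing '('
theorem pvDecomp : ∀ (cs : List Char), pvRun cs 0 = some 0 → '(' ∈ cs →
    ∃ p m t, cs = p ++ '(' :: m ++ ')' :: t ∧ '(' ∉ p ∧ ')' ∉ p ∧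
      pvRun m 0 = some 0 ∧ pvRun t 0 = some 0 := by
  intro cs
  induction cs with
  | nil => simp
  | cons c rest ih =>
    intro h hmem
    by_cases h1 : c = '('
    · subst h1
      simp only [pvRun, if_pos rfl] at h
      obtain ⟨m, t, rfl, hm, ht⟩ := pvRun_split rest.length rest 0 le_rfl h
      exact ⟨[], m, t, by simp, by simp, by simp, hm, ht⟩
    · by_cases h2 : c = ')'
      · subst h2; simp [pvRun] at h
      · simp only [pvRun, if_neg h1, if_neg h2] at h
        have hmem' : '(' ∈ rest := by
          rcases List.mem_cons.mp hmem with h' | h'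
          · exact absurd h'.symm h1
          · exact h'
        obtain ⟨p, m, t, rfl, hp1, hp2, hm, ht⟩ := ih h hmem'
        exact ⟨c :: p, m, t, by simp, by simp [hp1, Ne.symm h1],
          by simp [hp2, Ne.symm h2], hm, ht⟩

theorem pvFindLParen_some (cs : List Char) : ∀ i j, pvFindLParen cs i = some j → '(' ∈ cs := by
  induction cs with
  | nil => simp [pvFindLParen]
  | cons c rest ih =>
    intro i j h
    simp only [pvFindLParen] at h
    split_ifs at h with h1
    · simp [h1]
    · exact List.mem_cons_of_mem _ (ih (i+1) j h)

theorem pvFindLParen_none (cs : List Char) : ∀ i, pvFindLParen cs i = none → '(' ∉ cs := by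
  induction cs with
  | nil => simp
  | cons c rest ih =>
    intro i h
    simp only [pvFindLParen] at h
    split_ifs at h with h1
    simp only [List.mem_cons, not_or]
    exact ⟨Ne.symm h1, ih (i+1) h⟩

-- once an unmatched ')' has been seen, pvOk forbids every further '('
theorem pvOk_seen_noLParen (z : List Char) : pvOk z 0 true = true → '(' ∉ z := by
  induction z with
  | nil => simp
  | cons c rest ih =>
    intro h
    simp only [pvOk] at h
    by_cases h1 : c = '('
    · rw [if_pos h1] at h; simp at h
    · rw [if_neg h1] at h
      simp only [List.mem_cons, not_or]
      refine ⟨Ne.symm h1, ih ?_⟩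
      by_cases h2 : c = ')'
      · rw [if_pos h2] at h; exact h
      · rw [if_neg h2] at h; exact h

-- a string accepted by pvOk is a balanced part followed by a '('-free tail
theorem pvOk_decomp (cs : List Char) : ∀ (d : Nat), pvOk cs d false = true →
    ∃ w z, cs = w ++ z ∧ pvRun w d = some 0 ∧ '(' ∉ z := by
  induction cs with
  | nil =>
    intro d h
    simp only [pvOk, decide_eq_true_eq] at h
    exact ⟨[], [], rfl, by simp [pvRun, h], by simp⟩
  | cons c rest ih =>
    intro d h
    simp only [pvOk] at h
    by_cases h1 : c = '('
    · rw [if_pos h1] at h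
      simp only [Bool.not_true, Bool.and_eq_true, Bool.not_eq_eq_eq_not] at h
      obtain ⟨w, z, rfl, hw, hz⟩ := ih (d+1) h.2
      exact ⟨c :: w, z, rfl, by simpa [pvRun, h1] using hw, hz⟩
    · rw [if_neg h1] at h
      by_cases h2 : c = ')'
      · rw [if_pos h2] at h
        cases d with
        | zero =>
          exact ⟨[], c :: rest, rfl, by simp [pvRun],
            by simp [Ne.symm h1, pvOk_seen_noLParen rest h]⟩
        | succ d' =>
          obtain ⟨w, z, rfl, hw, hz⟩ := ih d' h
          refine ⟨c :: w, z, rfl, ?_, hz⟩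
          subst h2
          simp only [pvRun, if_neg (show ¬ ((')':Char) = '(') by decide), if_pos rfl]
          exact hw
      · rw [if_neg h2] at h
        obtain ⟨w, z, rfl, hw, hz⟩ := ih d h
        refine ⟨c :: w, z, rfl, ?_, hz⟩
        show pvRun (c :: w) d = some 0
        simp only [pvRun, if_neg h1, if_neg h2]
        exact hw

-- the main loop computes the depth-0 filter on accepted input
theorem pvCutLoop_eq_filter : ∀ (fuel : Nat) (cs : List Char), cs.length ≤ fuel →
    (∃ w z, cs = w ++ z ∧ pvRun w 0 = some 0 ∧ '(' ∉ z) →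
    pvCutLoop fuel cs = pvFilterDepth cs 0 := by
  intro fuel
  induction fuel with
  | zero =>
    intro cs hlen _
    match cs with
    | [] => simp [pvCutLoop, pvFilterDepth]
    | _ :: _ => simp at hlen
  | succ fuel ih =>
    intro cs hlen hdec
    obtain ⟨w, z, rfl, hw, hz⟩ := hdec
    rw [pvCutLoop]
    cases hfind : pvFindLParen (w ++ z) 0 with
    | none =>
      have hl := pvFindLParen_none (w ++ z) 0 hfind
      have hlw : '(' ∉ w := fun hmem => hl (List.mem_append_left z hmem)
      have hrw : ')' ∉ w := pvRun_no_lparen_no_rparen w hlw hw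
      rw [pvFilterDepth_parenFree w hlw hrw z, pvFilterDepth_noLParen z hz]
    | some left =>
      have hmemw : '(' ∈ w := by
        have := pvFindLParen_some (w ++ z) 0 left hfind
        rcases List.mem_append.mp this with h' | h'
        · exact h'
        · exact absurd h' hz
      obtain ⟨p, m, t, rfl, hp1, hp2, hm, ht⟩ := pvDecomp w hw hmemw
      have hshape : (p ++ '(' :: m ++ ')' :: t) ++ z
          = p ++ '(' :: (m ++ ')' :: (t ++ z)) := by simp
      have hleft : left = p.length := by
        rw [hshape] at hfind
        rw [pvFindLParen_parenFree p hp1 (m ++ ')' :: (t ++ z)) 0] at hfind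
        simpa using hfind.symm
      have hscan : pvScanBreak ((p ++ '(' :: m ++ ')' :: t) ++ z) 0 0
          = some (p.length + m.length + 1) := by
        rw [hshape]
        rw [pvScanBreak_parenFree p hp1 hp2 _ 0]
        simp only [pvScanBreak, if_pos rfl]
        rw [show (0:Int)+1 = ((0:Nat):Int)+1 by simp]
        rw [pvScanBreak_run m (')' :: (t ++ z)) 0 0 (0 + p.length + 1) hm]
        simp only [pvScanBreak, if_neg (show ¬ ((')':Char) = '(') by decide),
          if_pos rfl, if_pos (show ((0:Nat):Int) + 1 - 1 = 0 by simp)]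
        simp only [if_true]
        congr 1
        omega
      subst hleft
      simp only [hscan]
      have htake : ((p ++ '(' :: m ++ ')' :: t) ++ z).take p.length = p := by
        rw [show (p ++ '(' :: m ++ ')' :: t) ++ z = p ++ ('(' :: m ++ ')' :: t ++ z) by simp]
        exact List.take_left' rfl
      have hdrop : ((p ++ '(' :: m ++ ')' :: t) ++ z).drop (p.length + m.length + 1 + 1)
          = t ++ z := by
        rw [show (p ++ '(' :: m ++ ')' :: t) ++ z = (p ++ '(' :: m ++ [')']) ++ (t ++ z) by simp]
        exact List.drop_left' (by simp; omega)
      show pvCutLoop fuel (((p ++ '(' :: m ++ ')' :: t) ++ z).take p.length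
          ++ ((p ++ '(' :: m ++ ')' :: t) ++ z).drop (p.length + m.length + 1 + 1))
        = pvFilterDepth ((p ++ '(' :: m ++ ')' :: t) ++ z) 0
      rw [htake, hdrop]
      have hpt : pvRun (p ++ t) 0 = some 0 := by
        rw [pvRun_append, pvRun_parenFree p hp1 hp2 0]
        simpa using ht
      have hlen' : (p ++ (t ++ z)).length ≤ fuel := by
        simp only [List.length_append, List.length_cons] at hlen ⊢
        omega
      rw [ih (p ++ (t ++ z)) hlen' ⟨p ++ t, z, by simp, hpt, hz⟩]
      rw [pvFilterDepth_parenFree p hp1 hp2 (t ++ z)]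
      rw [hshape]
      rw [pvFilterDepth_parenFree p hp1 hp2 ('(' :: (m ++ ')' :: (t ++ z)))]
      congr 1
      simp only [pvFilterDepth, if_pos rfl]
      rw [show (0:Int)+1 = ((0:Nat):Int)+1 by simp]
      rw [pvFilterDepth_run m (')' :: (t ++ z)) 0 0 hm]
      simp only [pvFilterDepth,
        if_neg (show ¬ ((')':Char) = '(') by decide),
        if_pos (show (')':Char) = ')' ∧ (0:Int) < ((0:Nat):Int) + 1 by norm_num)]
      norm_num

theorem pvFold_congr : ∀ (l : List String), (∀ s ∈ l, pvOk s.toList 0 false = true) →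
    ∀ acc : List String,
    l.foldl (fun result item =>
        PySem.Set.add result (String.mk (pvCutLoop item.toList.length item.toList))) acc
    = l.foldl (fun result item =>
        PySem.Set.add result (String.mk (pvFilterDepth item.toList 0))) acc := by
  intro l
  induction l with
  | nil => intro _ acc; rfl
  | cons s rest ih =>
    intro hpre acc
    simp only [List.foldl_cons]
    rw [pvCutLoop_eq_filter s.toList.length s.toList le_rfl
      (pvOk_decomp s.toList 0 (hpre s (by simp)))]
    exact ih (fun x hx => hpre x (List.mem_cons_of_mem _ hx)) _

theorem cut_brackets_spec : Claim_equal_cut_brackets := by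
  intro compound _ hpre
  unfold Spec_cut_brackets cut_brackets cut_brackets_alt
  exact pvFold_congr compound hpre PySem.Set.empty
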